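-- pv_equiv track=rewrite | github.com/kyh-25/shortread | test.py | build_occ_table
-- ===== SOURCE A (Python) =====
-- from collections import defaultdict
--
-- def build_occ_table(bwt):
--     """ Occurrence 테이블: 특정 위치까지 각 문자가 몇 번 나왔는지를 저장 """
--     occ = defaultdict(list)
--     count = defaultdict(int)
--     for i, char in enumerate(bwt):
--         count[char] += 1
--         for c in set(bwt):
--             occ[c].append(count[c])
--     return occ
-- ===== SOURCE B (Python) =====
-- from collections import defaultdict
--
-- def _pref_counts(c, bwt):
--     # running count of c after each position
--     run = []
--     n = 0
--     for x in bwt: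
--         n = n + (1 if x == c else 0)
--         run.append(n)
--     return run
--
-- def build_occ_table(bwt):
--     """Occurrence table: one prefix-count row per character of the alphabet."""
--     occ = defaultdict(list)
--     for c in set(bwt):
--         occ[c] = _pref_counts(c, bwt)
--     return occ
-- ===== Notes on version B (the rewrite author's own statement) =====
-- stated objective: faster
-- what changed: A fills the table column-by-column, recomputing set(bwt) and appending the current count to every character's row at each position; B builds it row-by-row, computing each character's whole prefix-count list in one independent running-count scan.
import Mathlib
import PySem

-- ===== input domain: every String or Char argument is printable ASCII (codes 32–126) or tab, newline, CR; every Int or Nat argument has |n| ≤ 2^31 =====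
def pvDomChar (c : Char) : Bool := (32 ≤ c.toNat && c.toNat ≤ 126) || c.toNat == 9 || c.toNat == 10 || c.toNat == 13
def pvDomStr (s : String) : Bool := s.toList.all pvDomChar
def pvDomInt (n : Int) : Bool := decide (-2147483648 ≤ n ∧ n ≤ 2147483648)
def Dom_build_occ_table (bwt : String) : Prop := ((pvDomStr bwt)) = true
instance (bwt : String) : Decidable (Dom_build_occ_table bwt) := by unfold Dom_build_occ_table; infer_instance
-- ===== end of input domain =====

-- B builds the table row-by-row (one running-count scan per alphabet character) instead of
-- A's column-by-column pass; objective: faster (constant-factor, measured).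
-- Python dict outputs are compared ignoring order; both ports list the keys in
-- first-occurrence order (set(bwt) iteration order is not modelled).

-- ===== PORT A =====
-- Python char → length-1 Lean String key
def pvKey (c : Char) : String := String.ofList [c]

-- body of 'for i, char in enumerate(bwt):'
def pvStepA (keys : PySem.Set Char)
    (st : PySem.Dict String (List Int) × PySem.Dict String Int) (ch : Char) :
    PySem.Dict String (List Int) × PySem.Dict String Int :=
  let cnt := st.2.modify (pvKey ch) 0 (· + 1)
  let occ := keys.foldl
    (fun o c => o.modify (pvKey c) [] (fun l => l ++ [cnt.getD (pvKey c) 0])) st.1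
  (occ, cnt)

def build_occ_table (bwt : String) : List (String × List Int) :=
  let chars := bwt.toList
  let keys : PySem.Set Char := PySem.Set.ofList chars
  ((chars.foldl (pvStepA keys) (PySem.Dict.empty, PySem.Dict.empty)).1).items

-- ===== PORT B =====
-- running count of c after each position (B's helper _pref_counts)
def pvPrefCounts (c : Char) (chars : List Char) : List Int :=
  (chars.foldl
    (fun (st : List Int × Int) x =>
      let n := st.2 + (if x == c then 1 else 0)
      (st.1 ++ [n], n)) ([], 0)).1

def build_occ_table_alt (bwt : String) : List (String × List Int) :=
  let chars := bwt.toList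
  ((PySem.Set.ofList chars).foldl
    (fun (occ : PySem.Dict String (List Int)) c =>
      occ.insert (pvKey c) (pvPrefCounts c chars)) PySem.Dict.empty).items

-- ===== PRECONDITION & SPEC =====
def Spec_build_occ_table (bwt : String) (out : List (String × List Int)) : Prop := out = build_occ_table_alt bwt
instance (bwt : String) (out : List (String × List Int)) : Decidable (Spec_build_occ_table bwt out) := by unfold Spec_build_occ_table; infer_instance

-- ===== CLAIM (what is proved, stated in full; the proofs are below) =====
def Claim_equal_build_occ_table : Prop := ∀ (bwt : String), Dom_build_occ_table bwt → Spec_build_occ_table bwt (build_occ_table bwt)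

-- ===== LEMMAS AND PROOFS =====

theorem pvKey_inj : Function.Injective pvKey := by
  intro a b h
  have h2 := congrArg String.toList h
  simp only [pvKey, String.toList_ofList] at h2
  simpa using h2

-- second component of A's fold is a Counter over the mapped prefix
theorem pvStepA_snd (keys : PySem.Set Char) (p : List Char)
    (s : PySem.Dict String (List Int) × PySem.Dict String Int) :
    (p.foldl (pvStepA keys) s).2
      = p.foldl (fun d x => d.modify (pvKey x) 0 (· + 1)) s.2 := by
  induction p generalizing s with
  | nil => rfl
  | cons x xs ih => simp [pvStepA, ih]

theorem pvCnt_getD (p : List Char) (d : PySem.Dict String Int) (c : Char) :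
    (p.foldl (fun d x => d.modify (pvKey x) 0 (· + 1)) d).getD (pvKey c) 0
      = d.getD (pvKey c) 0 + p.count c := by
  induction p generalizing d with
  | nil => simp
  | cons x xs ih =>
    simp only [List.foldl_cons, ih, PySem.Dict.getD_modify, List.count_cons]
    by_cases hcx : c = x
    · subst hcx; simp; omega
    · have : pvKey c ≠ pvKey x := fun h => hcx (pvKey_inj h)
      simp [this]
      exact fun h => hcx h.symm

-- getD through the inner modify-append fold
theorem pvInner_getD (l : List Char) (hl : l.Nodup)
    (d : PySem.Dict String (List Int)) (w : Char → Int) (c : Char) :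
    (l.foldl (fun o x => o.modify (pvKey x) [] (fun v => v ++ [w x])) d).getD (pvKey c) []
      = if c ∈ l then d.getD (pvKey c) [] ++ [w c] else d.getD (pvKey c) [] := by
  induction l generalizing d with
  | nil => simp
  | cons x xs ih =>
    have hnd' : xs.Nodup := hl.of_cons
    simp only [List.foldl_cons, ih hnd', PySem.Dict.getD_modify, List.mem_cons]
    by_cases hcx : c = x
    · subst hcx
      have hnm : c ∉ xs := (List.nodup_cons.mp hl).1
      simp [hnm]
    · have hk : pvKey c ≠ pvKey x := fun h => hcx (pvKey_inj h)
      simp [hk, hcx]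

-- pvPrefCounts fold, full state
theorem pvPref_fold (c : Char) (p : List Char) (acc : List Int) (n : Int) :
    p.foldl
      (fun (st : List Int × Int) x =>
        let m := st.2 + (if x == c then 1 else 0)
        (st.1 ++ [m], m)) (acc, n)
      = (acc ++ (pvPrefCounts c p).map (· + n), n + p.count c) := by
  induction p generalizing acc n with
  | nil => simp [pvPrefCounts]
  | cons x xs ih =>
    have hpc : pvPrefCounts c (x :: xs)
        = (if x == c then (1:Int) else 0)
          :: (pvPrefCounts c xs).map (· + (if x == c then (1:Int) else 0)) := by
      unfold pvPrefCounts
      simp only [List.foldl_cons]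
      rw [ih]
      simp [pvPrefCounts]
    simp only [List.foldl_cons]
    rw [ih, hpc]
    simp only [List.map_cons, List.map_map, List.count_cons, List.append_assoc,
      List.cons_append, List.nil_append, Prod.mk.injEq]
    refine ⟨?_, ?_⟩
    · refine congrArg (acc ++ ·) ?_
      refine List.cons_eq_cons.mpr ⟨by omega, ?_⟩
      apply List.map_congr_left
      intro a _
      simp [Function.comp]
      omega
    · by_cases hxc : x = c <;> simp [hxc]
      omega

theorem pvPref_snd (c : Char) (p : List Char) :
    pvPrefCounts c (p ++ [x]) = pvPrefCounts c p ++ [(p.count c : Int) + (if x == c then 1 else 0)] := by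
  unfold pvPrefCounts
  rw [List.foldl_append, pvPref_fold c p [] 0]
  simp

theorem pvSet_update_self {α : Type} [BEq α] [LawfulBEq α] (s : PySem.Set α) (xs : List α)
    (h : ∀ x ∈ xs, x ∈ s) : PySem.Set.update s xs = s := by
  induction xs generalizing s with
  | nil => rfl
  | cons y ys ih =>
    have hy : y ∈ s := h y (by simp)
    have hadd : PySem.Set.add s y = s := by
      simp [PySem.Set.add, PySem.Set.contains, hy]
    simp only [PySem.Set.update, List.foldl_cons] at *
    rw [hadd]
    exact ih s (fun x hx => h x (by simp [hx]))

theorem pvStepA_fst (keys : PySem.Set Char)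
    (st : PySem.Dict String (List Int) × PySem.Dict String Int) (x : Char) :
    (pvStepA keys st x).1
      = keys.foldl
          (fun o c => o.modify (pvKey c) []
            (fun l => l ++ [(st.2.modify (pvKey x) 0 (· + 1)).getD (pvKey c) 0])) st.1 := rfl

-- A's occ invariant
theorem pvA_inv (keysL : List Char) (hnd : keysL.Nodup) (p : List Char) :
    ((p.foldl (pvStepA keysL) (PySem.Dict.empty, PySem.Dict.empty)).1).keys
        = (if p = [] then [] else keysL.map pvKey)
      ∧ ∀ c, ((p.foldl (pvStepA keysL) (PySem.Dict.empty, PySem.Dict.empty)).1).getD (pvKey c) []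
        = if c ∈ keysL then pvPrefCounts c p else [] := by
  induction p using List.reverseRecOn with
  | nil => simp [pvPrefCounts]
  | append_singleton q x ih =>
    obtain ⟨ihk, ihg⟩ := ih
    have hndK : (keysL.map pvKey).Nodup := hnd.map pvKey_inj
    rw [List.foldl_append]
    simp only [List.foldl_cons, List.foldl_nil]
    have hcnt : ∀ c : Char,
        ((List.foldl (pvStepA keysL) (PySem.Dict.empty, PySem.Dict.empty) q).2.modify
            (pvKey x) 0 (· + 1)).getD (pvKey c) 0
          = ((q.count c : Int) + (if x == c then 1 else 0)) := by
      intro c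
      have h1 : ((List.foldl (pvStepA keysL) (PySem.Dict.empty, PySem.Dict.empty) q).2.modify
            (pvKey x) 0 (· + 1))
          = (q ++ [x]).foldl (fun d y => d.modify (pvKey y) 0 (· + 1)) PySem.Dict.empty := by
        rw [List.foldl_append, pvStepA_snd]
        simp
      rw [h1, pvCnt_getD]
      by_cases hxc : x = c <;> simp [hxc, List.count_append]
    constructor
    · -- keys after the step
      rw [pvStepA_fst, PySem.Dict.keys_foldl_modify_key, ihk]
      by_cases hq : q = []
      · simp only [hq, List.nil_append, if_neg (by simp : ¬([x] : List Char) = [])]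
        exact PySem.Set.ofList_eq_self_of_nodup _ hndK
      · simp [hq]
        exact pvSet_update_self _ _ (fun y hy => hy)
    · -- values after the step
      intro c
      rw [pvStepA_fst, pvInner_getD keysL hnd]
      rw [hcnt c, ihg c]
      by_cases hc : c ∈ keysL
      · simp [hc, pvPref_snd]
      · simp [hc]

-- ===== VERDICT (by name: the statement is the Claim_ definition above) =====
theorem build_occ_table_spec : Claim_equal_build_occ_table := by
  intro bwt _
  unfold Spec_build_occ_table build_occ_table build_occ_table_alt
  have hnd : (PySem.Set.ofList bwt.toList).Nodup := PySem.Set.nodup_ofList bwt.toList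
  have hndK : ((PySem.Set.ofList bwt.toList).map pvKey).Nodup := hnd.map pvKey_inj
  obtain ⟨hk, hg⟩ := pvA_inv (PySem.Set.ofList bwt.toList) hnd bwt.toList
  have hB : ((PySem.Set.ofList bwt.toList).foldl
        (fun (occ : PySem.Dict String (List Int)) c =>
          occ.insert (pvKey c) (pvPrefCounts c bwt.toList)) PySem.Dict.empty).items
      = (PySem.Set.ofList bwt.toList).map (fun c => (pvKey c, pvPrefCounts c bwt.toList)) := by
    rw [PySem.Dict.items_foldl_insert_fresh _ _ _ _ (by simp) hndK]
    simp [PySem.Dict.empty]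
  by_cases hchars : bwt.toList = []
  · rw [hchars]
    simp only [PySem.Set.ofList] at hB ⊢
    rw [hchars] at hB
    simp only [List.foldl_nil] at hB ⊢
    exact hB.symm
  · have hkeysnd : ((bwt.toList.foldl (pvStepA (PySem.Set.ofList bwt.toList))
        (PySem.Dict.empty, PySem.Dict.empty)).1).keys.Nodup := by
      rw [hk, if_neg hchars]; exact hndK
    rw [PySem.Dict.items_eq_map_keys _ hkeysnd [], hk, if_neg hchars, hB, List.map_map]
    apply List.map_congr_left
    intro c hc
    have hgc := hg c
    rw [if_pos hc] at hgc
    simp [Function.comp, hgc]
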